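-- pv_equiv track=rewrite | github.com/aayush19973636/Data-Structures-and-Algorithms | Recursion Assignment/Count_Zeros.py | count
-- ===== SOURCE A (Python) =====
-- def count(n):
--     if n == 0:
--         return 1
--     if n < 10:
--         return 0
--     elif n % 10 == 0:
--         return count(n//10) + 1
--     return count(n//10)
-- ===== SOURCE B (Python) =====
-- def count(n):
--     if n == 0:
--         return 1
--     c = 0
--     while n >= 10:
--         if n % 10 == 0:
--             c += 1
--         n //= 10
--     return c
-- ===== Notes on version B (the rewrite author's own statement) =====
-- stated objective: simpler
-- what changed: Replaces the direct recursion with an iterative while loop over the digits with an explicit counter accumulator.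
import Mathlib
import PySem

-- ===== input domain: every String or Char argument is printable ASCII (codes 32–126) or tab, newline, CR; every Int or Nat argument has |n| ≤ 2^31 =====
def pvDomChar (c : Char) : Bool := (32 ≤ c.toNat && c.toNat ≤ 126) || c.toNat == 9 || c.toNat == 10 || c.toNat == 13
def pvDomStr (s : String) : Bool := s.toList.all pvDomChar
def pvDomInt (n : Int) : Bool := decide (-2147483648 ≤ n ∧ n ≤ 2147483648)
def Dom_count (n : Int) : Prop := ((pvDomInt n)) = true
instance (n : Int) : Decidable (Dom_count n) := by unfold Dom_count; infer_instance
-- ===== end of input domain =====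

-- B replaces A's direct recursion with an iterative digit loop carrying an explicit counter (objective: simpler).


theorem pv_fdiv10_toNat_lt (n : Int) (h : 10 ≤ n) :
    (PySem.Int.floordiv n 10).toNat < n.toNat := by
  rw [PySem.Int.floordiv_eq_ediv_of_pos (by omega)]
  omega

-- ===== PORT A =====
def count (n : Int) : Int :=
  if n == 0 then 1
  else if n < 10 then 0
  else if PySem.Int.mod n 10 == 0 then count (PySem.Int.floordiv n 10) + 1
  else count (PySem.Int.floordiv n 10)
termination_by n.toNat
decreasing_by all_goals exact pv_fdiv10_toNat_lt n (by omega)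

-- ===== PORT B =====
-- the while loop of Source B: state (n, c), runs while n >= 10
def countLoop (n c : Int) : Int :=
  if 10 ≤ n then
    countLoop (PySem.Int.floordiv n 10)
      (if PySem.Int.mod n 10 == 0 then c + 1 else c)
  else c
termination_by n.toNat
decreasing_by exact pv_fdiv10_toNat_lt n (by omega)

def count_alt (n : Int) : Int :=
  if n == 0 then 1 else countLoop n 0

-- ===== PRECONDITION & SPEC =====
def Spec_count (n : Int) (out : Int) : Prop := out = count_alt n
instance (n : Int) (out : Int) : Decidable (Spec_count n out) := by unfold Spec_count; infer_instance

-- ===== CLAIM (what is proved, stated in full; the proofs are below) =====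
def Claim_equal_count : Prop := ∀ (n : Int), Dom_count n → Spec_count n (count n)

-- ===== LEMMAS AND PROOFS =====

theorem countLoop_eq (k : Nat) : ∀ (n : Int), n.toNat ≤ k → 1 ≤ n →
    ∀ c, countLoop n c = count n + c := by
  induction k with
  | zero => intro n hk h1 c; omega
  | succ k ih =>
    intro n hk h1 c
    by_cases h10 : 10 ≤ n
    · have hdiv : PySem.Int.floordiv n 10 = n / 10 :=
        PySem.Int.floordiv_eq_ediv_of_pos (by omega)
      have hfd1 : 1 ≤ PySem.Int.floordiv n 10 := by rw [hdiv]; omega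
      have hfd2 : (PySem.Int.floordiv n 10).toNat ≤ k := by rw [hdiv]; omega
      have hA : ¬((n == 0) = true) := by simp; omega
      have hB : ¬ n < 10 := by omega
      rw [countLoop, if_pos h10, ih _ hfd2 hfd1]
      conv_rhs => rw [count, if_neg hA, if_neg hB]
      by_cases hm : (PySem.Int.mod n 10 == 0) = true
      · rw [if_pos hm, if_pos hm]; ring
      · rw [if_neg hm, if_neg hm]
    · have hA : ¬((n == 0) = true) := by simp; omega
      rw [count, countLoop, if_neg h10, if_neg hA, if_pos (by omega)]
      ring

-- ===== VERDICT (by name: the statement is the Claim_ definition above) =====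
theorem count_spec : Claim_equal_count := by
  intro n _
  unfold Spec_count count_alt
  by_cases h0 : n = 0
  · subst h0; simp [count]
  · rw [if_neg (by simpa using h0)]
    by_cases h1 : 1 ≤ n
    · rw [countLoop_eq n.toNat n le_rfl h1 0, add_zero]
    · have hA : ¬((n == 0) = true) := by simpa using h0
      rw [count, if_neg hA, if_pos (by omega), countLoop, if_neg (by omega)]
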